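-- pv_equiv track=rewrite | github.com/981377660LMT/algorithm-study | 9_排序和搜索/经典题/仍然可以赢的选手人数.py | solve
-- ===== SOURCE A (Python) =====
-- def solve(nums):
--     if not nums:
--         return 0
--     nums = sorted(nums)
--
--     # 贪心的给第一名1分，第二2分，并维护max
--     # 最后检查是否每个数有机会超过max
--     n = len(nums)
--     best = 0
--     for i in range(n):
--         best = max(best, nums[i] + n - i)
--
--     res = 0
--     for i in range(n):
--         if nums[i] + n >= best:
--             res += 1
--     return res
-- ===== SOURCE B (Python) =====
-- def solve(nums):
--     if not nums:
--         return 0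
--     nums = sorted(nums)
--     n = len(nums)
--     best = 0
--     for i, x in enumerate(nums):
--         best = max(best, x + n - i)
--     t = best - n
--     # players that can still win are exactly those with score >= t, a suffix
--     # of the ascending sorted list: binary-search its start instead of scanning
--     lo, hi = 0, n
--     while lo < hi:
--         mid = (lo + hi) // 2
--         if nums[mid] < t:
--             lo = mid + 1
--         else:
--             hi = mid
--     return n - lo
-- ===== Notes on version B (the rewrite author's own statement) =====
-- stated objective: alternative
-- what changed: The second counting pass over all n elements is replaced by a binary search: since the list is sorted ascending, the qualifying players form a suffix starting at the first index with nums[i] >= best - n, so B returns n minus that index found in O(log n).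
import Mathlib
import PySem

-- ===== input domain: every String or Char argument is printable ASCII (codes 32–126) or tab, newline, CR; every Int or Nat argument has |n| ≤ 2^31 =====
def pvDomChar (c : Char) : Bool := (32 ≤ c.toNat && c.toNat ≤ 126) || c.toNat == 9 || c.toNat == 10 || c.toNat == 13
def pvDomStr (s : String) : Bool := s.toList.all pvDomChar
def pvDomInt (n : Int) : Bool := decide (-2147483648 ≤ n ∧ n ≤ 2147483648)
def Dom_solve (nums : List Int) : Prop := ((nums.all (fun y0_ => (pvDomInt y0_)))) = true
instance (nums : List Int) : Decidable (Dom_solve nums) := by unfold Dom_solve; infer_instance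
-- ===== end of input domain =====

-- B replaces A's second counting pass by a binary search for the first qualifying
-- index in the sorted list (alternative decomposition, same overall cost).


-- ===== PORT A =====
def solve (nums : List Int) : Int :=
  if nums = [] then 0
  else
    let xs := PySem.List.sorted nums (fun x => x) false
    let n : Int := xs.length
    let best := (PySem.List.pyRange 0 n 1).foldl
      (fun best i => max best (PySem.List.pyGetD xs i 0 + n - i)) 0
    (PySem.List.pyRange 0 n 1).foldl
      (fun res i => if PySem.List.pyGetD xs i 0 + n ≥ best then res + 1 else res) 0

-- ===== PORT B =====
-- hand-written binary search from Source B: first index in [lo, hi) with xs[idx] >= t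
def bsearchLow (xs : List Int) (t : Int) (lo hi : Int) : Int :=
  if h : lo < hi then
    let mid := PySem.Int.floordiv (lo + hi) 2
    if PySem.List.pyGetD xs mid 0 < t then bsearchLow xs t (mid + 1) hi
    else bsearchLow xs t lo mid
  else lo
termination_by (hi - lo).toNat
decreasing_by
  · have h1 : lo ≤ PySem.Int.floordiv (lo + hi) 2 := by
      rw [PySem.Int.le_floordiv_iff_mul_le (by omega)]; omega
    omega
  · have h2 : PySem.Int.floordiv (lo + hi) 2 < hi := by
      rw [PySem.Int.floordiv_lt_iff_lt_mul (by omega)]; omega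
    omega

def solve_alt (nums : List Int) : Int :=
  if nums = [] then 0
  else
    let xs := PySem.List.sorted nums (fun x => x) false
    let n : Int := xs.length
    let best := (PySem.List.enumerate xs 0).foldl
      (fun best p => max best (p.2 + n - p.1)) 0
    let t := best - n
    n - bsearchLow xs t 0 n

-- ===== PRECONDITION & SPEC =====
def Spec_solve (nums : List Int) (out : Int) : Prop := out = solve_alt nums
instance (nums : List Int) (out : Int) : Decidable (Spec_solve nums out) := by unfold Spec_solve; infer_instance

-- ===== CLAIM (what is proved, stated in full; the proofs are below) =====
def Claim_equal_solve : Prop := ∀ (nums : List Int), Dom_solve nums → Spec_solve nums (solve nums)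

-- ===== LEMMAS AND PROOFS =====

-- in a sorted list, an element < t at index m forces at least m+1 elements < t
theorem countP_lt_ge_of_getElem_lt (xs : List Int) (t : Int)
    (hs : xs.Pairwise (· ≤ ·)) (m : Nat) (hm : m < xs.length) (hlt : xs[m] < t) :
    m + 1 ≤ xs.countP (fun x => decide (x < t)) := by
  induction xs generalizing m with
  | nil => simp at hm
  | cons a l ih =>
    rcases List.pairwise_cons.mp hs with ⟨hal, hl⟩
    cases m with
    | zero =>
      simp at hlt
      simp [hlt]
    | succ m =>
      simp at hm
      have h1 := ih hl m hm (by simpa using hlt)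
      have ha : a < t := lt_of_le_of_lt (hal _ (List.getElem_mem hm)) (by simpa using hlt)
      simp [ha]
      omega

-- in a sorted list, an element ≥ t at index m bounds the count of elements < t by m
theorem countP_lt_le_of_getElem_ge (xs : List Int) (t : Int)
    (hs : xs.Pairwise (· ≤ ·)) (m : Nat) (hm : m < xs.length) (hge : ¬ xs[m] < t) :
    xs.countP (fun x => decide (x < t)) ≤ m := by
  induction xs generalizing m with
  | nil => simp at hm
  | cons a l ih =>
    rcases List.pairwise_cons.mp hs with ⟨hal, hl⟩
    cases m with
    | zero =>
      have ha : ¬ a < t := by simpa using hge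
      have : ∀ x ∈ a :: l, ¬ (fun x => decide (x < t)) x = true := by
        intro x hx
        rcases List.mem_cons.mp hx with rfl | hx
        · simpa using ha
        · have := hal x hx; simp; omega
      simp [List.countP_eq_zero.mpr this]
    | succ m =>
      simp at hm
      have h1 := ih hl m hm (by simpa using hge)
      by_cases ha : a < t <;> simp [ha] <;> omega

-- the binary search returns the number of elements < t, given the invariant
theorem bsearchLow_eq (xs : List Int) (t : Int)
    (hs : xs.Pairwise (· ≤ ·)) :
    ∀ (lo hi : Int), 0 ≤ lo → hi ≤ xs.length →
      lo ≤ (xs.countP (fun x => decide (x < t)) : Int) →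
      (xs.countP (fun x => decide (x < t)) : Int) ≤ hi →
      bsearchLow xs t lo hi = (xs.countP (fun x => decide (x < t)) : Int) := by
  intro lo hi
  induction lo, hi using bsearchLow.induct xs t with
  | case1 lo hi h mid hlt ih =>
    intro hlo hhi hc1 hc2
    have hmlo : lo ≤ mid := by
      rw [show mid = PySem.Int.floordiv (lo + hi) 2 from rfl,
        PySem.Int.le_floordiv_iff_mul_le (by omega)]; omega
    have hmhi : mid < hi := by
      rw [show mid = PySem.Int.floordiv (lo + hi) 2 from rfl,
        PySem.Int.floordiv_lt_iff_lt_mul (by omega)]; omega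
    have hmlen : mid < (xs.length : Int) := by omega
    have hget : PySem.List.pyGetD xs mid 0 = xs[mid.toNat]'(by omega) :=
      PySem.List.pyGetD_eq_getElem (xs := xs) (i := mid) (d := 0) (by omega) hmlen
    have hkey := countP_lt_ge_of_getElem_lt xs t hs mid.toNat (by omega)
      (by rw [← hget]; exact hlt)
    rw [bsearchLow]
    simp only [dif_pos h]
    have hmid : mid = PySem.Int.floordiv (lo + hi) 2 := rfl
    rw [← hmid, if_pos hlt]
    exact ih (by omega) hhi (by omega) hc2
  | case2 lo hi h mid hge ih =>
    intro hlo hhi hc1 hc2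
    have hmlo : lo ≤ mid := by
      rw [show mid = PySem.Int.floordiv (lo + hi) 2 from rfl,
        PySem.Int.le_floordiv_iff_mul_le (by omega)]; omega
    have hmhi : mid < hi := by
      rw [show mid = PySem.Int.floordiv (lo + hi) 2 from rfl,
        PySem.Int.floordiv_lt_iff_lt_mul (by omega)]; omega
    have hmlen : mid < (xs.length : Int) := by omega
    have hget : PySem.List.pyGetD xs mid 0 = xs[mid.toNat]'(by omega) :=
      PySem.List.pyGetD_eq_getElem (xs := xs) (i := mid) (d := 0) (by omega) hmlen
    have hkey := countP_lt_le_of_getElem_ge xs t hs mid.toNat (by omega)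
      (by rw [← hget]; exact hge)
    rw [bsearchLow]
    simp only [dif_pos h]
    have hmid : mid = PySem.Int.floordiv (lo + hi) 2 := rfl
    rw [← hmid, if_neg hge]
    exact ih hlo (by omega) hc1 (by omega)
  | case3 lo hi h =>
    intro hlo hhi hc1 hc2
    rw [bsearchLow]
    simp only [dif_neg h]
    omega

-- ===== VERDICT (by name: the statement is the Claim_ definition above) =====
theorem solve_spec : Claim_equal_solve := by
  intro nums _
  unfold Spec_solve solve solve_alt
  by_cases hnil : nums = []
  · simp [hnil]
  · simp only [if_neg hnil]
    set xs := PySem.List.sorted nums (fun x => x) false with hxs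
    set n : Int := (xs.length : Int) with hn
    have hs : xs.Pairwise (· ≤ ·) := PySem.List.sorted_pairwise nums (fun x => x)
    -- the two best-folds agree
    have hbest : (PySem.List.enumerate xs 0).foldl (fun best p => max best (p.2 + n - p.1)) 0
        = (PySem.List.pyRange 0 n 1).foldl
            (fun best i => max best (PySem.List.pyGetD xs i 0 + n - i)) 0 := by
      rw [PySem.List.enumerate_eq_map_pyRange (d := 0), List.foldl_map]
      simp [hn]
    set best := (PySem.List.pyRange 0 n 1).foldl
      (fun best i => max best (PySem.List.pyGetD xs i 0 + n - i)) 0 with hbestdef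
    rw [hbest]
    set t := best - n with ht
    set c := xs.countP (fun x => decide (x < t)) with hc
    have hcle : c ≤ xs.length := List.countP_le_length
    have hbs : bsearchLow xs t 0 n = (c : Int) := by
      apply bsearchLow_eq xs t hs 0 n (by omega) (by omega)
        (by positivity) (by rw [hn]; exact_mod_cast hcle)
    -- A's counting loop counts the elements ≥ t
    have hcount : (PySem.List.pyRange 0 n 1).foldl
        (fun res i => if PySem.List.pyGetD xs i 0 + n ≥ best then res + 1 else res) 0
        = (xs.countP (fun x => decide (x + n ≥ best)) : Int) := by
      rw [hn, PySem.List.foldl_pyRange_zero_pyGetD' xs 0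
        (fun res v => if v + n ≥ best then res + 1 else res) 0]
      rw [PySem.List.foldl_ite_add_one (p := fun v => v + n ≥ best)]
      simp [hn]
    rw [hcount, hbs]
    have hcompl : xs.countP (fun x => decide (x + n ≥ best)) + c = xs.length := by
      rw [hc]
      have := List.length_eq_countP_add_countP (l := xs) (p := fun x => decide (x + n ≥ best))
      rw [this]
      congr 1
      apply List.countP_congr
      intro x _
      simp [ht]
      omega
    omega
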